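-- pv_equiv track=rewrite | github.com/TonyWhitley/rFactorTidy | rFactorTidy.py | _near_duplicate
-- ===== SOURCE A (Python) =====
-- from typing import List, Tuple #, Set, Dict, Optional   # pylint: disable=wrong-import-position
--
-- def _near_duplicate(line1: str, line2: str) -> Tuple[int, int]:   # pylint: disable=no-self-use
--     """
--     Return tokens same and different in the two lines
--     """
--     _delims = './\\=_-'
--     for _d in _delims:
--         line1 = line1.replace(_d, ' ')
--         line2 = line2.replace(_d, ' ')
--     _line1 = line1.split()
--     _line2 = line2.split()
--     _same = 0
--     _diff = 0
--     for i, _w in enumerate(_line1):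
--         if i < len(_line2):
--             if _w == _line2[i]:
--                 _same += 1
--             else:
--                 _diff += 1
--         else:
--             _diff += 1
--     return _same, _diff
-- ===== SOURCE B (Python) =====
-- def _near_duplicate(line1, line2):
--     """
--     Return tokens same and different in the two lines
--     """
--     _delims = './\\=_-'
--
--     def _tokens(s):
--         # streaming tokenizer: yields maximal runs of non-separator chars
--         tok = ''
--         for ch in s:
--             if ch.isspace() or ch in _delims:
--                 if tok:
--                     yield tok
--                     tok = ''
--             else:
--                 tok += ch
--         if tok:
--             yield tok
--
--     same = diff = 0
--     it2 = _tokens(line2)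
--     for w in _tokens(line1):
--         if w == next(it2, None):
--             same += 1
--         else:
--             diff += 1
--     return same, diff
-- ===== Notes on version B (the rewrite author's own statement) =====
-- stated objective: alternative
-- what changed: Instead of six string-wide replace passes followed by split and an index-bounded counting loop over materialized lists, B fuses tokenization and comparison: a single-pass streaming tokenizer (generator over characters, treating whitespace and delimiters as separators directly) feeds both lines, and the second line's tokens are consumed lazily through an iterator with a None sentinel, so no translated string, no token lists and no index arithmetic exist.
import Mathlib
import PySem

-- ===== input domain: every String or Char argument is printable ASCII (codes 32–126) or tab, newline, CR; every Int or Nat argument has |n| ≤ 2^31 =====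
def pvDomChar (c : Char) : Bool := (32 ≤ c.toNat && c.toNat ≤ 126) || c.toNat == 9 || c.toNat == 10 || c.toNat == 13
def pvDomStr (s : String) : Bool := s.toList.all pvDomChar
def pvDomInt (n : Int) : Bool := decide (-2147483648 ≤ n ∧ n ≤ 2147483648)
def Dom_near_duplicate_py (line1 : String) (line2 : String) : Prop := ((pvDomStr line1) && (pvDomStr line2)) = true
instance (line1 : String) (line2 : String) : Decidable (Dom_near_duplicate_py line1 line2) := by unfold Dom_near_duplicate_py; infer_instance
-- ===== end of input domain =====

-- B fuses tokenization and comparison into one streaming pass (a character-level tokenizer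
-- feeding a lazy stream comparison) instead of A's replace passes, splits and indexed loop
-- (objective: alternative).

-- ===== PORT A =====
-- transliteration of A: fold the six replaces over both lines, split, then fold over
-- enumerate(_line1) accumulating (_same, _diff) with the index-bound branch.
def near_duplicate_py (line1 : String) (line2 : String) : Int × Int :=
  let st := "./\\=_-".toList.foldl
    (fun (p : String × String) d =>
      (PySem.Str.replace p.1 (String.ofList [d]) " ", PySem.Str.replace p.2 (String.ofList [d]) " "))
    (line1, line2)
  let l1 := PySem.Str.split₀ st.1
  let l2 := PySem.Str.split₀ st.2
  (PySem.List.enumerate l1).foldl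
    (fun (sd : Int × Int) (iw : Int × String) =>
      if iw.1 < (l2.length : Int) then
        -- i < len(_line2), so _line2[i] is in range; getD's default is unreachable
        if ((PySem.List.pyGet? l2 iw.1).getD "") == iw.2 then (sd.1 + 1, sd.2)
        else (sd.1, sd.2 + 1)
      else (sd.1, sd.2 + 1))
    (0, 0)

-- ===== PORT B =====
-- transliteration of B: a streaming tokenizer (the generator _tokens, cur token carried as
-- the accumulator) emitting tokens as they close, and a loop over line1's token stream that
-- consumes line2's stream lazily (next(it2, None): the [] branch is the None sentinel).
def altSep (c : Char) : Bool := PySem.Chars.isspace c || "./\\=_-".toList.contains c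

def altTokens : List Char → List Char → List String
  | [], tok => if tok.isEmpty then [] else [String.ofList tok]
  | c :: rest, tok =>
    if altSep c then
      if tok.isEmpty then altTokens rest [] else String.ofList tok :: altTokens rest []
    else altTokens rest (tok ++ [c])

def altCmp : List String → List String → Int → Int → Int × Int
  | [], _, s, d => (s, d)
  | _ :: t1, [], s, d => altCmp t1 [] s (d + 1)          -- next(it2, None) = None ≠ w
  | w :: t1, w2 :: t2, s, d =>
    if w == w2 then altCmp t1 t2 (s + 1) d else altCmp t1 t2 s (d + 1)

def near_duplicate_py_alt (line1 : String) (line2 : String) : Int × Int :=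
  altCmp (altTokens line1.toList []) (altTokens line2.toList []) 0 0

-- ===== PRECONDITION & SPEC =====
def Spec_near_duplicate_py (line1 : String) (line2 : String) (out : Int × Int) : Prop := out = near_duplicate_py_alt line1 line2
instance (line1 : String) (line2 : String) (out : Int × Int) : Decidable (Spec_near_duplicate_py line1 line2 out) := by unfold Spec_near_duplicate_py; infer_instance

-- ===== CLAIM (what is proved, stated in full; the proofs are below) =====
def Claim_equal_near_duplicate_py : Prop := ∀ (line1 : String) (line2 : String), Dom_near_duplicate_py line1 line2 → Spec_near_duplicate_py line1 line2 (near_duplicate_py line1 line2)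

-- ===== LEMMAS AND PROOFS =====

-- the translation A's six replaces perform on one character
def trChar (c : Char) : Char := if ("./\\=_-".toList).contains c then ' ' else c

-- replacing a single char by a single char is a pointwise map
theorem replace_go_single (d : Char) :
    ∀ (n : Nat) (l acc : List Char), l.length ≤ n →
      PySem.Chars.replace.go [d] [' '] n l acc
        = acc.reverse ++ l.map (fun c => if c = d then ' ' else c) := by
  intro n
  induction n with
  | zero =>
    intro l acc h
    have : l = [] := List.eq_nil_of_length_eq_zero (Nat.le_zero.mp h)
    subst this; simp [PySem.Chars.replace.go]
  | succ n ih =>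
    intro l acc h
    cases l with
    | nil => simp [PySem.Chars.replace.go]
    | cons c t =>
      simp only [PySem.Chars.replace.go]
      by_cases hc : c = d
      · subst hc
        have hp : List.isPrefixOf [c] (c :: t) = true := by simp [List.isPrefixOf]
        rw [if_pos hp]
        simp only [List.length, List.drop]
        rw [ih t _ (by simpa using h)]
        simp
      · have hp : List.isPrefixOf [d] (c :: t) = false := by
          simp [List.isPrefixOf]; intro hdc; exact (hc hdc.symm).elim
        rw [if_neg (by simp [hp])]
        rw [ih t _ (by simpa using h)]
        simp [hc]

theorem replace_single (d : Char) (s : List Char) :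
    PySem.Chars.replace s [d] [' '] = s.map (fun c => if c = d then ' ' else c) := by
  simp only [PySem.Chars.replace, List.isEmpty]
  rw [if_neg (by simp)]
  simpa using replace_go_single d s.length s [] le_rfl

-- the six sequential replaces act as one per-character translation
theorem fold_replace_eq_map (cs : List Char) :
    ("./\\=_-".toList.foldl
      (fun acc d => PySem.Chars.replace acc [d] [' ']) cs)
      = cs.map trChar := by
  have step : ∀ (ds : List Char) (xs : List Char),
      (ds.foldl (fun acc d => PySem.Chars.replace acc [d] [' ']) xs)
        = xs.map (fun c => ds.foldl (fun x d => if x = d then ' ' else x) c) := by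
    intro ds
    induction ds with
    | nil => intro xs; simp
    | cons d t ih =>
      intro xs
      simp only [List.foldl_cons]
      rw [replace_single, ih, List.map_map]
      rfl
  rw [step]
  apply List.map_congr_left
  intro c _
  show ("./\\=_-".toList).foldl (fun x d => if x = d then ' ' else x) c = trChar c
  have hds : "./\\=_-".toList = ['.', '/', '\\', '=', '_', '-'] := by decide
  rw [hds]
  simp only [trChar, hds, List.foldl_cons, List.foldl_nil, List.contains_cons, List.contains_nil]
  by_cases h1 : c = '.' <;> by_cases h2 : c = '/' <;> by_cases h3 : c = '\\' <;>
    by_cases h4 : c = '=' <;> by_cases h5 : c = '_' <;> by_cases h6 : c = '-' <;>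
    simp_all

-- the counting loop of A, characterised: same = zip-equal count, diff = len1 - same
theorem loopA (l2 : List String) :
    ∀ (l1 : List String) (k : Nat) (s d : Int),
      (PySem.List.enumerate l1 (k : Int)).foldl
        (fun (sd : Int × Int) (iw : Int × String) =>
          if iw.1 < (l2.length : Int) then
            if ((PySem.List.pyGet? l2 iw.1).getD "") == iw.2 then (sd.1 + 1, sd.2)
            else (sd.1, sd.2 + 1)
          else (sd.1, sd.2 + 1))
        (s, d)
      = (s + (((l1.zip (l2.drop k)).filter (fun p => p.1 == p.2)).length : Int),
         d + ((l1.length : Int)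
              - (((l1.zip (l2.drop k)).filter (fun p => p.1 == p.2)).length : Int))) := by
  intro l1
  induction l1 with
  | nil => intro k s d; simp [PySem.List.enumerate]
  | cons w t ih =>
    intro k s d
    have hcast : (k : Int) + 1 = ((k + 1 : Nat) : Int) := by push_cast; ring
    simp only [PySem.List.enumerate, List.foldl_cons]
    by_cases hk : k < l2.length
    · have hget : PySem.List.pyGet? l2 (k : Int) = l2[k]? := PySem.List.pyGet?_natCast l2 k
      have hdrop : l2.drop k = l2[k] :: l2.drop (k + 1) := (List.getElem_cons_drop hk).symm
      rw [if_pos (by exact_mod_cast hk)]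
      rw [hget, List.getElem?_eq_getElem hk]
      simp only [Option.getD_some, hdrop, List.zip_cons_cons, List.filter_cons]
      by_cases hw : l2[k] = w
      · have hw' : (w == l2[k]) = true := by simp [hw]
        rw [if_pos (by simp [hw])]
        rw [hcast, ih (k + 1) (s + 1) d]
        simp only [hw', List.length_cons, if_pos, Prod.mk.injEq]
        refine ⟨by push_cast; ring, by push_cast; ring⟩
      · have hw' : (w == l2[k]) = false := by
          simp only [beq_eq_false_iff_ne, ne_eq]; intro h; exact hw h.symm
        rw [if_neg (by simp only [beq_iff_eq]; exact hw)]
        rw [hcast, ih (k + 1) s (d + 1)]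
        simp only [hw', List.length_cons, Bool.false_eq_true, if_false, Prod.mk.injEq]
        exact ⟨trivial, by push_cast; ring⟩
    · have hk' : ¬ ((k : Int) < (l2.length : Int)) := by exact_mod_cast hk
      rw [if_neg hk']
      have hdrop : l2.drop k = [] := List.drop_eq_nil_of_le (Nat.le_of_not_lt hk)
      have hdrop' : l2.drop (k + 1) = [] := List.drop_eq_nil_of_le (by omega)
      rw [hcast, ih (k + 1) s (d + 1)]
      simp only [hdrop, hdrop', List.zip_nil_right, List.filter_nil, List.length_nil,
        List.length_cons, Nat.cast_zero, Prod.mk.injEq]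
      exact ⟨trivial, by push_cast; ring⟩

-- the pair fold of A acts componentwise
theorem pairfold_eq (ds : List Char) (a b : String) :
    ds.foldl
      (fun (p : String × String) d =>
        (PySem.Str.replace p.1 (String.ofList [d]) " ", PySem.Str.replace p.2 (String.ofList [d]) " "))
      (a, b)
    = (ds.foldl (fun s d => PySem.Str.replace s (String.ofList [d]) " ") a,
       ds.foldl (fun s d => PySem.Str.replace s (String.ofList [d]) " ") b) := by
  induction ds generalizing a b with
  | nil => simp
  | cons d t ih => simp only [List.foldl_cons]; exact ih _ _

theorem toListfold_eq (ds : List Char) (a : String) :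
    (ds.foldl (fun s d => PySem.Str.replace s (String.ofList [d]) " ") a).toList
    = ds.foldl (fun cs d => PySem.Chars.replace cs [d] [' ']) a.toList := by
  induction ds generalizing a with
  | nil => simp
  | cons d t ih =>
    simp only [List.foldl_cons]
    rw [ih]
    congr 1
    rw [PySem.Str.toList_replace]
    congr 1
    exact String.toList_ofList

-- A's six replaces produce the per-character translated string
theorem foldrep_eq (a : String) :
    ("./\\=_-".toList.foldl (fun s d => PySem.Str.replace s (String.ofList [d]) " ") a)
    = String.ofList (a.toList.map trChar) :=
  String.toList_inj.mp (by rw [toListfold_eq, fold_replace_eq_map]; exact String.toList_ofList.symm)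

-- split₀ of an ofList, on the go level
theorem split_ofList (L : List Char) :
    PySem.Str.split₀ (String.ofList L) = (PySem.Chars.split₀.go L [] []).map String.ofList := by
  simp [PySem.Str.split₀, PySem.Chars.split₀, String.toList_ofList]

-- unfolding equations for split₀.go (cited via simp only below)
theorem go_nil (cur : List Char) (acc : List (List Char)) :
    PySem.Chars.split₀.go [] cur acc
      = if cur.isEmpty then acc.reverse else (cur.reverse :: acc).reverse := by
  simp only [PySem.Chars.split₀.go]

theorem go_cons (c : Char) (t cur : List Char) (acc : List (List Char)) :
    PySem.Chars.split₀.go (c :: t) cur acc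
      = if PySem.Chars.isspace c then
          (if cur.isEmpty then PySem.Chars.split₀.go t [] acc
           else PySem.Chars.split₀.go t [] (cur.reverse :: acc))
        else PySem.Chars.split₀.go t (c :: cur) acc := by
  simp only [PySem.Chars.split₀.go]

-- split₀.go's accumulator peels off
theorem split_go_acc :
    ∀ (cs cur : List Char) (acc : List (List Char)),
      PySem.Chars.split₀.go cs cur acc = acc.reverse ++ PySem.Chars.split₀.go cs cur [] := by
  intro cs
  induction cs with
  | nil =>
    intro cur acc
    by_cases h : cur.isEmpty <;> simp [go_nil, h]
  | cons c t ih =>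
    intro cur acc
    rw [go_cons, go_cons]
    by_cases hs : PySem.Chars.isspace c
    · by_cases he : cur.isEmpty
      · simp only [hs, he, if_true]
        exact ih [] acc
      · simp only [hs, he, if_true, if_false, Bool.false_eq_true]
        rw [ih [] (cur.reverse :: acc), ih [] [cur.reverse]]
        simp
    · simp only [hs, Bool.false_eq_true, if_false]
      exact ih (c :: cur) acc

-- the separator test of B agrees with "translated char is whitespace"
theorem sep_iff (c : Char) : PySem.Chars.isspace (trChar c) = altSep c := by
  unfold trChar altSep
  by_cases h : ("./\\=_-".toList).contains c
  · rw [if_pos h, h, Bool.or_true]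
    decide
  · have h' : ("./\\=_-".toList).contains c = false := eq_false_of_ne_true h
    simp only [h', Bool.false_eq_true, if_false, Bool.or_false]

-- a non-separator character is left unchanged by the translation
theorem tr_of_not_sep (c : Char) (hs : altSep c = false) : trChar c = c := by
  unfold trChar
  have : ("./\\=_-".toList).contains c = false := by
    unfold altSep at hs
    exact (Bool.or_eq_false_iff.mp hs).2
  simp only [this, Bool.false_eq_true, if_false]

-- B's streaming tokenizer equals split₀ of the translated characters
theorem altTokens_eq :
    ∀ (cs tok : List Char),
      altTokens cs tok
        = (PySem.Chars.split₀.go (cs.map trChar) tok.reverse []).map String.ofList := by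
  intro cs
  induction cs with
  | nil =>
    intro tok
    by_cases h : tok.isEmpty
    · have h0 : tok = [] := by simpa [List.isEmpty_iff] using h
      subst h0
      simp [altTokens, go_nil]
    · have h' : tok.reverse.isEmpty = false := by
        simp only [List.isEmpty_reverse]; simpa using h
      simp [altTokens, go_nil, h, h']
  | cons c t ih =>
    intro tok
    simp only [List.map_cons, altTokens]
    rw [go_cons, sep_iff c]
    by_cases hs : altSep c
    · by_cases he : tok.isEmpty
      · have h0 : tok = [] := by simpa [List.isEmpty_iff] using he
        subst h0
        simp only [hs, if_true, List.reverse_nil, List.isEmpty_nil]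
        exact ih []
      · have h' : tok.reverse.isEmpty = false := by
          simp only [List.isEmpty_reverse]; simpa using he
        simp only [hs, he, h', if_true, if_false, Bool.false_eq_true]
        rw [split_go_acc (t.map trChar) [] [tok.reverse.reverse], ih []]
        simp
    · have hs' : altSep c = false := by simpa using hs
      have hface : (tok ++ [c]).reverse = c :: tok.reverse := by simp
      simp only [hs, Bool.false_eq_true, if_false]
      rw [ih (tok ++ [c]), hface, tr_of_not_sep c hs']

-- B's fused comparison loop, characterised the same way as A's
theorem altCmp_eq :
    ∀ (t1 t2 : List String) (s d : Int),
      altCmp t1 t2 s d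
        = (s + (((t1.zip t2).filter (fun p => p.1 == p.2)).length : Int),
           d + ((t1.length : Int) - (((t1.zip t2).filter (fun p => p.1 == p.2)).length : Int))) := by
  intro t1
  induction t1 with
  | nil => intro t2 s d; simp [altCmp]
  | cons w t ih =>
    intro t2 s d
    cases t2 with
    | nil =>
      rw [show altCmp (w :: t) [] s d = altCmp t [] s (d + 1) from rfl, ih]
      simp only [List.zip_nil_right, List.filter_nil, List.length_nil, Nat.cast_zero,
        List.length_cons, Prod.mk.injEq]
      exact ⟨trivial, by push_cast; ring⟩
    | cons w2 t2' =>
      simp only [altCmp, List.zip_cons_cons, List.filter_cons]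
      by_cases hw : w = w2
      · have hw' : (w == w2) = true := by simp [hw]
        rw [if_pos hw', ih]
        simp only [hw', List.length_cons, if_pos, Prod.mk.injEq]
        exact ⟨by push_cast; ring, by push_cast; ring⟩
      · have hw' : (w == w2) = false := by simpa using hw
        rw [if_neg (by simp [hw]), ih]
        simp only [hw', List.length_cons, Bool.false_eq_true, if_false, Prod.mk.injEq]
        exact ⟨trivial, by push_cast; ring⟩

-- ===== VERDICT (by name: the statement is the Claim_ definition above) =====
theorem near_duplicate_py_spec : Claim_equal_near_duplicate_py := by
  intro line1 line2 _
  unfold Spec_near_duplicate_py near_duplicate_py near_duplicate_py_alt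
  simp only [pairfold_eq, foldrep_eq, split_ofList]
  rw [show ((0 : Int)) = ((0 : Nat) : Int) from rfl]
  rw [loopA]
  rw [altTokens_eq, altTokens_eq]
  simp only [List.reverse_nil]
  rw [altCmp_eq]
  simp
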